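-- pv_equiv track=rewrite | github.com/emilonpt/AOC2022 | Day6.py | find_signals
-- ===== SOURCE A (Python) =====
-- def find_signals(transmission,length):
--     transmission = transmission[0]
--     last_n = []
--     for i,c in enumerate(transmission):
--         if len(last_n) < length:
--             last_n.append(c)
--         else:
--             if len(last_n) == len(set(last_n)):
--                 return i
--             else:
--                 last_n = last_n[1:]
--                 last_n.append(c)
-- ===== SOURCE B (Python) =====
-- def find_signals(transmission, length):
--     s = transmission[0]
--     counts = {}
--     dups = 0  # number of distinct chars occurring >= 2 times in the current window
--     for i, c in enumerate(s):
--         if i >= length: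
--             if dups == 0:
--                 return i
--             old = s[i - length]  # always present in counts with count >= 1 here
--             counts[old] -= 1
--             if counts[old] == 1:
--                 dups -= 1
--         counts[c] = counts.get(c, 0) + 1
--         if counts[c] == 2:
--             dups += 1
-- ===== Notes on version B (the rewrite author's own statement) =====
-- stated objective: alternative
-- what changed: Replaces A's per-position window-list copy and set() rebuild with a single pass that keeps a char-count dict and a running count of duplicated chars, updated incrementally as the window slides.
import Mathlib
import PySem

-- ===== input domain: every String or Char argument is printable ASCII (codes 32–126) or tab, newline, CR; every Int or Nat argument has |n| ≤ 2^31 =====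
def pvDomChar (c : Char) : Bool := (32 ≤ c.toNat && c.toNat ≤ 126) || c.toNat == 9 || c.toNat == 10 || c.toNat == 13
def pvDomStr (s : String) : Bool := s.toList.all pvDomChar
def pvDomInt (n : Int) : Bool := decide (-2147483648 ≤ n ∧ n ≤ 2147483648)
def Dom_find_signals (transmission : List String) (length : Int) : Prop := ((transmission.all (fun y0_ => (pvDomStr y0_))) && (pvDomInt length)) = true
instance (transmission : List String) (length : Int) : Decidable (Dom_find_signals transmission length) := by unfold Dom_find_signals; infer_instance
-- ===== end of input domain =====

-- B replaces A's per-step window-list copy + set() rebuild by a sliding window kept as a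
-- char-count dict with an incrementally maintained duplicate counter (alternative algorithm).

-- ===== PORT A =====
-- the for-loop of A: state = (last_n, i), early return via Option
def findA_loop (L : Int) : List Char → List Char → Nat → Option Int
  | [], _, _ => none
  | c :: rest, last_n, i =>
    if (last_n.length : Int) < L then
      findA_loop L rest (last_n ++ [c]) (i + 1)
    else if last_n.length = (PySem.Set.ofList last_n).length then
      some (i : Int)
    else
      findA_loop L rest (PySem.List.slice last_n (some 1) none ++ [c]) (i + 1)

def find_signals (transmission : List String) (length : Int) : Option Int :=
  match PySem.List.pyGet? transmission 0 with
  | none => none   -- transmission[0] raises IndexError; excluded by Pre_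
  | some s => findA_loop length s.toList [] 0

-- ===== PORT B =====
-- counts[c] = counts.get(c, 0) + 1; if counts[c] == 2: dups += 1
def findB_add (counts : PySem.Dict Char Int) (dups : Int) (c : Char) :
    PySem.Dict Char Int × Int :=
  let counts := counts.insert c (counts.getD c 0 + 1)
  (counts, if counts.getD c 0 = 2 then dups + 1 else dups)

-- the for-loop of B: state = (counts, dups, i); cs is the whole string s
def findB_loop (cs : List Char) (L : Int) :
    List Char → PySem.Dict Char Int → Int → Nat → Option Int
  | [], _, _, _ => none
  | c :: rest, counts, dups, i =>
    if L ≤ (i : Int) then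
      if dups = 0 then some (i : Int)
      else
        match PySem.List.pyGet? cs ((i : Int) - L) with
        | none => none   -- unreachable: the index is always in range here
        | some old =>
          let counts := counts.insert old (counts.getD old 0 - 1)
          let dups := if counts.getD old 0 = 1 then dups - 1 else dups
          let (counts, dups) := findB_add counts dups c
          findB_loop cs L rest counts dups (i + 1)
    else
      let (counts, dups) := findB_add counts dups c
      findB_loop cs L rest counts dups (i + 1)

def find_signals_alt (transmission : List String) (length : Int) : Option Int :=
  match PySem.List.pyGet? transmission 0 with
  | none => none   -- IndexError; excluded by Pre_
  | some s => findB_loop s.toList length s.toList PySem.Dict.empty 0 0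

-- ===== PRECONDITION & SPEC =====
-- A evaluates transmission[0]; on the empty list both programs raise IndexError.
def Pre_find_signals (transmission : List String) (length : Int) : Prop :=
  transmission ≠ []
instance (transmission : List String) (length : Int) : Decidable (Pre_find_signals transmission length) := by unfold Pre_find_signals; infer_instance

def pvWitness_find_signals : List String × Int := (["abcaf"], 3)

def Spec_find_signals (transmission : List String) (length : Int) (out : Option Int) : Prop := out = find_signals_alt transmission length
instance (transmission : List String) (length : Int) (out : Option Int) : Decidable (Spec_find_signals transmission length out) := by unfold Spec_find_signals; infer_instance

-- ===== CLAIM (what is proved, stated in full; the proofs are below) =====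
def Claim_equal_find_signals : Prop := ∀ (transmission : List String) (length : Int), Dom_find_signals transmission length → Pre_find_signals transmission length → Spec_find_signals transmission length (find_signals transmission length)

-- ===== LEMMAS AND PROOFS =====

-- number of distinct chars occurring at least twice in w (what B's `dups` tracks)
def dupCnt (w : List Char) : Nat :=
  (w.toFinset.filter (fun c => 2 ≤ w.count c)).card

lemma dupCnt_perm {u v : List Char} (h : u.Perm v) : dupCnt u = dupCnt v := by
  unfold dupCnt
  rw [List.toFinset_eq_of_perm u v h]
  congr 1
  apply Finset.filter_congr
  intro c _
  simp [h.count_eq]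

lemma dupCnt_cons (c : Char) (w : List Char) :
    dupCnt (c :: w) = dupCnt w + (if w.count c = 1 then 1 else 0) := by
  unfold dupCnt
  have hfil : ((c :: w).toFinset.filter (fun d => 2 ≤ (c :: w).count d)) =
      (if w.count c = 1 then insert c (w.toFinset.filter (fun d => 2 ≤ w.count d))
       else (w.toFinset.filter (fun d => 2 ≤ w.count d))) := by
    ext d
    by_cases hd : d = c
    · subst hd
      by_cases h1 : w.count d = 1
      · rw [if_pos h1]
        simp [Finset.mem_filter, List.count_cons, h1]
      · rw [if_neg h1]
        simp only [Finset.mem_filter, List.toFinset_cons, Finset.mem_insert, List.mem_toFinset,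
          List.count_cons_self, true_or, true_and]
        constructor
        · intro hc
          have hm : d ∈ w := List.count_pos_iff.mp (by omega)
          exact ⟨hm, by omega⟩
        · rintro ⟨hm, hc⟩
          omega
    · have hmem : d ∈ ((c :: w).toFinset.filter (fun d => 2 ≤ (c :: w).count d)) ↔
          d ∈ (w.toFinset.filter (fun d => 2 ≤ w.count d)) := by
        simp only [Finset.mem_filter, List.toFinset_cons, Finset.mem_insert, List.mem_toFinset,
          List.count_cons, beq_iff_eq]
        simp [hd, Ne.symm hd]
      rw [hmem]
      split_ifs with h1
      · simp [Finset.mem_insert, hd]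
      · rfl
  rw [hfil]
  split_ifs with h1
  · rw [Finset.card_insert_of_notMem]
    simp only [Finset.mem_filter, not_and]
    intro _
    omega
  · simp

lemma dupCnt_append_singleton (w : List Char) (c : Char) :
    dupCnt (w ++ [c]) = dupCnt w + (if w.count c = 1 then 1 else 0) := by
  rw [dupCnt_perm (List.perm_append_singleton c w), dupCnt_cons]

lemma dupCnt_eq_zero_iff (w : List Char) : dupCnt w = 0 ↔ w.Nodup := by
  unfold dupCnt
  rw [Finset.card_eq_zero, Finset.filter_eq_empty_iff, List.nodup_iff_count_le_one]
  constructor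
  · intro h d
    by_cases hm : d ∈ w
    · have := h (List.mem_toFinset.mpr hm); omega
    · simp [List.count_eq_zero_of_not_mem hm]
  · intro h d _
    have := h d
    omega

-- len(set(w)) == len(w) iff w has no duplicates
lemma set_len_eq_iff (w : List Char) :
    w.length = (PySem.Set.ofList w).length ↔ w.Nodup := by
  constructor
  · intro h
    have hperm : (PySem.Set.ofList w).Perm w.dedup := by
      apply (List.perm_ext_iff_of_nodup (PySem.Set.nodup_ofList w) w.nodup_dedup).mpr
      intro a
      rw [PySem.Set.mem_ofList, List.mem_dedup]
    have hlen : w.dedup.length = w.length := by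
      rw [← hperm.length_eq, ← h]
    have : w.dedup = w := w.dedup_sublist.eq_of_length hlen
    rw [← this]
    exact w.nodup_dedup
  · intro h
    rw [PySem.Set.ofList_eq_self_of_nodup w h]

-- counts/dups mirror the window w
def CntInv (w : List Char) (counts : PySem.Dict Char Int) (dups : Int) : Prop :=
  (∀ d, counts.getD d 0 = (w.count d : Int)) ∧ dups = (dupCnt w : Int)

lemma CntInv_add {w counts dups} (c : Char) (h : CntInv w counts dups) :
    CntInv (w ++ [c]) (findB_add counts dups c).1 (findB_add counts dups c).2 := by
  obtain ⟨hc, hd⟩ := h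
  unfold findB_add
  simp only
  constructor
  · intro d
    rw [PySem.Dict.getD_insert]
    split_ifs with hdc
    · subst hdc
      rw [hc d, List.count_append]
      simp
    · rw [hc d, List.count_append]
      simp [Ne.symm hdc]
  · rw [PySem.Dict.getD_insert_self, hc c, hd, dupCnt_append_singleton]
    have : ((w.count c : Int) + 1 = 2) ↔ w.count c = 1 := by omega
    split_ifs with h1 h2 h2
    · push_cast; ring
    · exact absurd (this.mp h1) h2
    · exact absurd (this.mpr h2) h1
    · rfl

lemma CntInv_remove_head {wt counts dups} (old : Char) (h : CntInv (old :: wt) counts dups) :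
    CntInv wt (counts.insert old (counts.getD old 0 - 1))
      (if (counts.insert old (counts.getD old 0 - 1)).getD old 0 = 1 then dups - 1 else dups) := by
  obtain ⟨hc, hd⟩ := h
  have hold : counts.getD old 0 - 1 = (wt.count old : Int) := by
    rw [hc old, List.count_cons_self]; push_cast; ring
  constructor
  · intro d
    rw [PySem.Dict.getD_insert]
    split_ifs with hdc
    · subst hdc; exact hold
    · rw [hc d]
      norm_cast
      simp [Ne.symm hdc]
  · rw [PySem.Dict.getD_insert_self, hold, hd, dupCnt_cons]
    have : ((wt.count old : Int) = 1) ↔ wt.count old = 1 := by omega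
    split_ifs with h1 h2 h2
    · push_cast; ring
    · exact absurd (this.mp h1) h2
    · exact absurd (this.mpr h2) h1
    · rfl

-- main loop bisimulation for 0 < L
lemma loop_eq (cs : List Char) (L : Int) (hL : 0 < L) :
    ∀ (rest : List Char) (i : Nat) (w taken : List Char)
      (counts : PySem.Dict Char Int) (dups : Int),
      cs = taken ++ rest → taken.length = i →
      ((i : Int) < L → w = taken) →
      (L ≤ (i : Int) → ∃ pre, taken = pre ++ w ∧ (pre.length : Int) = (i : Int) - L) →
      CntInv w counts dups →
      findA_loop L rest w i = findB_loop cs L rest counts dups i := by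
  intro rest
  induction rest with
  | nil => intro i w taken counts dups _ _ _ _ _; rfl
  | cons c rest ih =>
    intro i w taken counts dups hcs hlen h1 h2 hinv
    by_cases hi : (i : Int) < L
    · -- phase 1: still filling the window
      have hw : w = taken := h1 hi
      have hwl : (w.length : Int) < L := by rw [hw, hlen]; exact hi
      rw [findA_loop, findB_loop, if_pos hwl, if_neg (by omega)]
      have hnew := CntInv_add c hinv
      apply ih (i + 1) (w ++ [c]) (taken ++ [c]) _ _ (by simp [hcs]) (by simp [hlen])
      · intro _; rw [hw]
      · intro hle
        refine ⟨[], by simp [hw], ?_⟩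
        simp only [List.length_nil]
        omega
      · exact hnew
    · -- phase 2: full window
      obtain ⟨pre, hpre, hprelen⟩ := h2 (by omega)
      have hwl : (w.length : Int) = L := by
        have := hlen
        rw [hpre, List.length_append] at this
        omega
      rw [findA_loop, findB_loop, if_neg (show ¬ ((w.length : Int) < L) by omega),
        if_pos (show L ≤ (i : Int) by omega)]
      obtain ⟨hc, hd⟩ := hinv
      by_cases hnd : w.Nodup
      · have h0 : dupCnt w = 0 := (dupCnt_eq_zero_iff w).mpr hnd
        rw [if_pos ((set_len_eq_iff w).mpr hnd), if_pos (show dups = 0 by rw [hd, h0]; rfl)]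
      · have hdup0 : dupCnt w ≠ 0 := fun h => hnd ((dupCnt_eq_zero_iff w).mp h)
        rw [if_neg (fun h => hnd ((set_len_eq_iff w).mp h)),
          if_neg (show ¬ dups = 0 by rw [hd]; exact_mod_cast hdup0)]
        obtain ⟨old, wt, rfl⟩ : ∃ old wt, w = old :: wt := by
          cases w with
          | nil => exact absurd List.nodup_nil hnd
          | cons a b => exact ⟨a, b, rfl⟩
        have hget : PySem.List.pyGet? cs ((i : Int) - L) = some old := by
          rw [hcs, hpre, ← hprelen]
          rw [List.append_assoc, List.cons_append]
          exact PySem.List.pyGet?_append_length pre _ old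
        rw [hget]
        have hrem := CntInv_remove_head old ⟨hc, hd⟩
        have hadd := CntInv_add c hrem
        simp only [findB_add] at hadd ⊢
        have hslice : PySem.List.slice (old :: wt) (some 1) none = wt := by
          rw [PySem.List.slice_from (old :: wt) (a := 1) (by norm_num)]
          rfl
        rw [hslice]
        apply ih (i + 1) (wt ++ [c]) (taken ++ [c]) _ _ (by simp [hcs]) (by simp [hlen])
        · intro h; omega
        · intro _
          refine ⟨pre ++ [old], ?_, ?_⟩
          · rw [hpre]; simp
          · simp only [List.length_append, List.length_singleton]
            push_cast
            omega
        · exact hadd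

-- degenerate case: length ≤ 0 (both return 0 on a nonempty string, none on an empty one)
lemma loop_eq_nonpos (cs : List Char) (L : Int) (hL : L ≤ 0) :
    findA_loop L cs [] 0 = findB_loop cs L cs PySem.Dict.empty 0 0 := by
  cases cs with
  | nil => rfl
  | cons c rest =>
    rw [findA_loop, findB_loop, if_neg (show ¬ ((List.length ([] : List Char) : Int) < L) by
        simp only [List.length_nil, Int.natCast_zero]; omega),
      if_pos (show L ≤ ((0 : Nat) : Int) by exact_mod_cast hL), if_pos rfl,
      if_pos (show ([] : List Char).length = (PySem.Set.ofList ([] : List Char)).length from rfl)]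

-- ===== VERDICT (by name: the statement is the Claim_ definition above) =====
theorem find_signals_spec : Claim_equal_find_signals := by
  intro transmission length _ hpre
  unfold Spec_find_signals find_signals find_signals_alt
  cases transmission with
  | nil => exact absurd rfl hpre
  | cons s ts =>
    rw [PySem.List.pyGet?_zero_cons]
    by_cases hL : 0 < length
    · apply loop_eq s.toList length hL s.toList 0 [] [] PySem.Dict.empty 0 (by simp) rfl
        (fun _ => rfl) (fun h => absurd h (by omega))
      constructor
      · intro d; simp [PySem.Dict.getD_empty]
      · rfl
    · exact loop_eq_nonpos s.toList length (by omega)
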